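-- pv_equiv track=rewrite | github.com/grenmarket/algo | shortest_word_cover.py | shortest_cover
-- ===== SOURCE A (Python) =====
-- def prefix_suffix_table(s, i):
--     if i == 0:
--         return [0]
--     prev = prefix_suffix_table(s, i - 1)
--     if s[i] == s[prev[-1]]:
--         prev.append(prev[-1] + 1)
--     else:
--         prev.append(0 if s[i] != s[0] else 1)
--     return prev
--
-- def shortest_cover(word):
--     # easier to operate on 1-indexed arrays
--     ps_table = [0] + prefix_suffix_table(word, len(word)-1)
--     cover_range = [i for i in range(0, len(word)+1)]
--     cover = cover_range.copy()
--     for i in range(2, len(word)+1):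
--         # ps_table[i] is the longest prefix-suffix of word[1...i]
--         # cover[longest prefix-suffix of k] is the shortest cover of that prefix-suffix
--         # cover_range[cover of prefix-suffix of k] is the length of the longest part of word[1...i] that can be
--         # covered with that cover
--
--         # if the word V is a prefix-suffix of the word X, and the word W is a cover of the word X (and |W| <= |V|)
--         # then W is also a cover of V
--         if ps_table[i] > 0 and i - cover_range[cover[ps_table[i]]] <= cover[ps_table[i]]:
--             cover[i] = cover[ps_table[i]]
--             cover_range[cover[ps_table[i]]] = i
--     return word[:cover[ps_table[-1]]]
-- ===== SOURCE B (Python) =====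
-- def shortest_cover(word):
--     if not word:
--         return ''
--     n = len(word)
--     # 1-indexed prefix-suffix table (same simplified recurrence, computed iteratively)
--     ps = [0, 0]
--     for i in range(1, n):
--         if word[i] == word[ps[-1]]:
--             ps.append(ps[-1] + 1)
--         else:
--             ps.append(1 if word[i] == word[0] else 0)
--     # build cover by appending; reach remembers the furthest position each cover length reaches
--     cover = [0, 1]
--     reach = {}
--     for i in range(2, n + 1):
--         p = ps[i]
--         c = cover[p]
--         if p > 0 and i - reach.get(c, c) <= c:
--             cover.append(c)
--             reach[c] = i
--         else:
--             cover.append(i)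
--     return word[:cover[ps[n]]]
-- ===== Notes on version B (the rewrite author's own statement) =====
-- stated objective: alternative
-- what changed: Replaces the O(n)-deep linear recursion of prefix_suffix_table by an iterative forward pass that appends to the table, and rebuilds the cover computation to grow the cover list by appending while a dict (defaulting to the identity) replaces the mutated full-size cover_range array.
import Mathlib
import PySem

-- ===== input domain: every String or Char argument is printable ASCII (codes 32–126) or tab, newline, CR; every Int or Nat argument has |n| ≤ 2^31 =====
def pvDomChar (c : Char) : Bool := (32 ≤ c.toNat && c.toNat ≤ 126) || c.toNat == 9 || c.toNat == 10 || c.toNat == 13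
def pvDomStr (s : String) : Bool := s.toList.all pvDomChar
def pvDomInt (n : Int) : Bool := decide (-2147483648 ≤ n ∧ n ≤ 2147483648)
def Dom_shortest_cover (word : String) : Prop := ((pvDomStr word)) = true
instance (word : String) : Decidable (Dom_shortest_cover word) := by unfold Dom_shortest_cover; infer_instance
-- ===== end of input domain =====

-- B replaces A's linear-recursion prefix-suffix helper by an iterative forward pass and builds
-- the cover table by appending (with a dict of reached ranges) instead of mutating two full arrays.

-- ===== PORT A =====
-- Python's recursion diverges for i < 0 (only reached for word = ''); the Lean index is a Nat,
-- so the port is faithful on i ≥ 0, and word = '' is excluded by Pre_.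
def prefix_suffix_table (s : List Char) : Nat → List Int
  | 0 => [0]
  | i + 1 =>
    let prev := prefix_suffix_table s i
    if PySem.List.pyGet? s ((i : Int) + 1) = PySem.List.pyGet? s (PySem.List.pyGetD prev (-1) 0) then
      prev ++ [PySem.List.pyGetD prev (-1) 0 + 1]
    else if PySem.List.pyGet? s ((i : Int) + 1) ≠ PySem.List.pyGet? s 0 then
      prev ++ [0]
    else
      prev ++ [1]

def coverStepA (ps_table : List Int) (st : List Int × List Int) (i : Int) : List Int × List Int :=
  -- st.1 = cover_range, st.2 = cover
  if PySem.List.pyGetD ps_table i 0 > 0 ∧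
      i - PySem.List.pyGetD st.1 (PySem.List.pyGetD st.2 (PySem.List.pyGetD ps_table i 0) 0) 0
        ≤ PySem.List.pyGetD st.2 (PySem.List.pyGetD ps_table i 0) 0 then
    let cov' := PySem.List.pySetD st.2 i (PySem.List.pyGetD st.2 (PySem.List.pyGetD ps_table i 0) 0)
    (PySem.List.pySetD st.1 (PySem.List.pyGetD cov' (PySem.List.pyGetD ps_table i 0) 0) i, cov')
  else st

def shortest_cover (word : String) : String :=
  let s := word.toList
  let n := s.length
  let ps_table : List Int := 0 :: prefix_suffix_table s (n - 1)
  let cover_range : List Int := PySem.List.pyRange 0 ((n : Int) + 1)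
  let cover : List Int := cover_range
  let st := (PySem.List.pyRange 2 ((n : Int) + 1)).foldl (coverStepA ps_table) (cover_range, cover)
  PySem.Str.slice word none (some (PySem.List.pyGetD st.2 (PySem.List.pyGetD ps_table (-1) 0) 0))

-- ===== PORT B =====
def altPsStep (s : List Char) (ps : List Int) (i : Int) : List Int :=
  if PySem.List.pyGet? s i = PySem.List.pyGet? s (PySem.List.pyGetD ps (-1) 0) then
    ps ++ [PySem.List.pyGetD ps (-1) 0 + 1]
  else if PySem.List.pyGet? s i = PySem.List.pyGet? s 0 then
    ps ++ [1]
  else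
    ps ++ [0]

def altCoverStep (ps : List Int) (st : List Int × PySem.Dict Int Int) (i : Int) :
    List Int × PySem.Dict Int Int :=
  -- st.1 = cover (built by appending), st.2 = reach (dict, default = identity)
  let p := PySem.List.pyGetD ps i 0
  let c := PySem.List.pyGetD st.1 p 0
  if p > 0 ∧ i - st.2.getD c c ≤ c then
    (st.1 ++ [c], st.2.insert c i)
  else
    (st.1 ++ [i], st.2)

def shortest_cover_alt (word : String) : String :=
  if word.toList = [] then "" else
  let s := word.toList
  let n := s.length
  let ps : List Int := (PySem.List.pyRange 1 (n : Int)).foldl (altPsStep s) [0, 0]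
  let st := (PySem.List.pyRange 2 ((n : Int) + 1)).foldl (altCoverStep ps)
    ([0, 1], PySem.Dict.empty)
  PySem.Str.slice word none (some (PySem.List.pyGetD st.1 (PySem.List.pyGetD ps (n : Int) 0) 0))

-- ===== PRECONDITION & SPEC =====
-- Pre_ excludes only the empty word, on which A's helper recurses without bound (RecursionError).
def Pre_shortest_cover (word : String) : Prop := word ≠ ""
instance (word : String) : Decidable (Pre_shortest_cover word) := by
  unfold Pre_shortest_cover; infer_instance
def pvWitness_shortest_cover : String := "abab"

def Spec_shortest_cover (word : String) (out : String) : Prop := out = shortest_cover_alt word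
instance (word : String) (out : String) : Decidable (Spec_shortest_cover word out) := by
  unfold Spec_shortest_cover; infer_instance

-- ===== CLAIM (what is proved, stated in full; the proofs are below) =====
def Claim_equal_shortest_cover : Prop := ∀ (word : String), Dom_shortest_cover word →
  Pre_shortest_cover word → Spec_shortest_cover word (shortest_cover word)

-- ===== LEMMAS AND PROOFS =====

lemma pst_length (s : List Char) (i : Nat) : (prefix_suffix_table s i).length = i + 1 := by
  induction i with
  | zero => rfl
  | succ i ih =>
    simp only [prefix_suffix_table]
    split_ifs <;> simp [ih]

lemma pst_ne_nil (s : List Char) (i : Nat) : prefix_suffix_table s i ≠ [] := by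
  have := pst_length s i
  intro h; rw [h] at this; simp at this

-- prev[-1] is the entry at the top index
lemma pst_neg_one (s : List Char) (i : Nat) :
    PySem.List.pyGetD (prefix_suffix_table s i) (-1) 0 = (prefix_suffix_table s i).getD i 0 := by
  rw [PySem.List.pyGetD_neg_one _ _ (pst_ne_nil s i)]
  rw [List.getLast_eq_getElem]
  rw [List.getD_eq_getElem _ _ (by simp [pst_length])]
  congr 1
  simp [pst_length]

lemma pst_bounds (s : List Char) (i j : Nat) (hj : j ≤ i) :
    0 ≤ (prefix_suffix_table s i).getD j 0 ∧ (prefix_suffix_table s i).getD j 0 ≤ (j : Int) := by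
  induction i generalizing j with
  | zero =>
    interval_cases j
    simp [prefix_suffix_table]
  | succ i ih =>
    have hlen := pst_length s i
    rcases Nat.lt_or_ge j (i + 1) with hlt | hge
    · have hj' : j ≤ i := by omega
      have hget : ∀ x : Int, (prefix_suffix_table s i ++ [x]).getD j 0 =
          (prefix_suffix_table s i).getD j 0 := by
        intro x
        rw [List.getD_append _ _ _ _ (by omega)]
      simp only [prefix_suffix_table]
      split_ifs <;> simp only [hget] <;> exact ih j hj'
    · have hj' : j = i + 1 := by omega
      subst hj'
      have hgetr : ∀ x : Int, (prefix_suffix_table s i ++ [x]).getD (i + 1) 0 = x := by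
        intro x
        rw [List.getD_append_right _ _ _ _ (by omega)]
        simp [hlen]
      have hlast := (ih i (Nat.le_refl i))
      simp only [prefix_suffix_table]
      split_ifs <;> simp only [hgetr]
      · rw [pst_neg_one]
        obtain ⟨h1, h2⟩ := hlast
        constructor
        · omega
        · push_cast
          omega
      · constructor <;> omega
      · constructor <;> omega


lemma psB_eq (s : List Char) (i : Nat) :
    (PySem.List.pyRange 1 ((i : Int) + 1)).foldl (altPsStep s) [0, 0] =
      0 :: prefix_suffix_table s i := by
  induction i with
  | zero =>
    rw [PySem.List.pyRange_one_eq_nil (by omega)]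
    rfl
  | succ i ih =>
    have h1 : (1 : Int) ≤ (i : Int) + 1 := by omega
    have hc : ((i + 1 : Nat) : Int) + 1 = ((i : Int) + 1) + 1 := by push_cast; ring
    rw [hc, PySem.List.pyRange_one_succ_right h1, List.foldl_append, ih]
    simp only [List.foldl_cons, List.foldl_nil]
    have hne := pst_ne_nil s i
    have hcons : PySem.List.pyGetD (0 :: prefix_suffix_table s i) (-1) 0 =
        PySem.List.pyGetD (prefix_suffix_table s i) (-1) 0 := by
      rw [PySem.List.pyGetD_neg_one _ _ (by simp), PySem.List.pyGetD_neg_one _ _ hne]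
      exact List.getLast_cons hne
    simp only [altPsStep, prefix_suffix_table, hcons]
    split_ifs with h1 h2 h3 <;> first | rfl | (exfalso; tauto)


def CoverInv (n : Nat) (k : Nat) (stA : List Int × List Int)
    (stB : List Int × PySem.Dict Int Int) : Prop :=
  stA.1.length = n + 1 ∧ stA.2.length = n + 1 ∧ stB.1.length = k + 1 ∧
  (∀ j : Nat, j ≤ n → stA.1.getD j 0 = stB.2.getD (j : Int) (j : Int)) ∧
  (∀ j : Nat, j ≤ k → stA.2.getD j 0 = stB.1.getD j 0) ∧
  (∀ j : Nat, k < j → j ≤ n → stA.2.getD j 0 = (j : Int)) ∧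
  (∀ j : Nat, j ≤ k → 0 ≤ stB.1.getD j 0 ∧ stB.1.getD j 0 ≤ (j : Int))

-- getD of set, via the PySem set/get lemmas
lemma getD_set_of_lt (l : List Int) (m : Nat) (v : Int) (j : Nat) (hm : m < l.length) :
    (l.set m v).getD j 0 = if j = m then v else l.getD j 0 := by
  rw [← PySem.List.pyGetD_natCast, ← PySem.List.pySetD_natCast,
    PySem.List.pyGetD_pySetD_natCast _ _ _ _ _ hm, PySem.List.pyGetD_natCast]

lemma getD_append_last (l : List Int) (x : Int) : (l ++ [x]).getD l.length 0 = x := by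
  rw [List.getD_append_right _ _ _ _ (Nat.le_refl _)]
  simp

lemma cover_step (n : Nat) (psT : List Int)
    (hb : ∀ i : Nat, 1 ≤ i → i ≤ n → 0 ≤ psT.getD i 0 ∧ psT.getD i 0 ≤ (i : Int) - 1)
    (k : Nat) (hkn : k + 1 ≤ n)
    (stA : List Int × List Int) (stB : List Int × PySem.Dict Int Int)
    (h : CoverInv n k stA stB) :
    CoverInv n (k + 1) (coverStepA psT stA ((k : Int) + 1)) (altCoverStep psT stB ((k : Int) + 1)) := by
  obtain ⟨hA1, hA2, hB1, hI4, hI5, hI6, hI7⟩ := h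
  have hiLcast : ((k : Int) + 1) = (((k + 1 : Nat)) : Int) := by push_cast; ring
  have hpi : PySem.List.pyGetD psT ((k : Int) + 1) 0 = psT.getD (k + 1) 0 := by
    rw [hiLcast, PySem.List.pyGetD_natCast]
  obtain ⟨hp0, hpk⟩ := hb (k + 1) (by omega) hkn
  set p : Int := psT.getD (k + 1) 0 with hpd
  set pn : Nat := p.toNat with hpn
  have hpcast : (pn : Int) = p := Int.toNat_of_nonneg hp0
  have hpnk : pn ≤ k := by push_cast at hpk; omega
  have hcB : PySem.List.pyGetD stB.1 p 0 = stB.1.getD pn 0 := by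
    rw [← hpcast, PySem.List.pyGetD_natCast]
  set c : Int := stB.1.getD pn 0 with hcd
  obtain ⟨hc0, hcp⟩ := hI7 pn hpnk
  set cn : Nat := c.toNat with hcn
  have hccast : (cn : Int) = c := Int.toNat_of_nonneg hc0
  have hcnk : cn ≤ k := by omega
  have hcovA : PySem.List.pyGetD stA.2 p 0 = c := by
    rw [← hpcast, PySem.List.pyGetD_natCast, hI5 pn hpnk]
  have hcrA : PySem.List.pyGetD stA.1 c 0 = stB.2.getD c c := by
    rw [← hccast, PySem.List.pyGetD_natCast, hI4 cn (by omega), hccast]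
  have hsetA2 : PySem.List.pySetD stA.2 ((k : Int) + 1) c = stA.2.set (k + 1) c := by
    rw [hiLcast, PySem.List.pySetD_natCast]
  have hcov'p : PySem.List.pyGetD (stA.2.set (k + 1) c) p 0 = c := by
    rw [← hpcast, PySem.List.pyGetD_natCast,
      getD_set_of_lt _ _ _ _ (by omega), if_neg (by omega), hI5 pn hpnk]
  have hsetA1 : PySem.List.pySetD stA.1 c ((k : Int) + 1) = stA.1.set cn ((k : Int) + 1) := by
    rw [← hccast, PySem.List.pySetD_natCast]
  simp only [coverStepA, altCoverStep, hpi, hcovA, hcrA, hcB, hsetA2, hcov'p, hsetA1]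
  by_cases hcond : p > 0 ∧ (k : Int) + 1 - stB.2.getD c c ≤ c
  · rw [if_pos hcond, if_pos hcond]
    refine ⟨by simpa using hA1, by simpa using hA2, by simp [hB1], ?_, ?_, ?_, ?_⟩
    · intro j hj
      rw [getD_set_of_lt _ _ _ _ (by omega), PySem.Dict.getD_insert]
      by_cases hjc : j = cn
      · rw [if_pos hjc, if_pos (by rw [hjc, hccast])]
      · rw [if_neg hjc, if_neg (by rw [← hccast]; exact_mod_cast hjc), hI4 j hj]
    · intro j hj
      rw [getD_set_of_lt _ _ _ _ (by omega)]
      by_cases hje : j = k + 1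
      · rw [if_pos hje, hje, ← hB1, getD_append_last]
      · rw [if_neg hje, List.getD_append _ _ _ _ (by omega), hI5 j (by omega)]
    · intro j hj1 hj2
      rw [getD_set_of_lt _ _ _ _ (by omega), if_neg (by omega), hI6 j (by omega) hj2]
    · intro j hj
      by_cases hje : j = k + 1
      · subst hje
        rw [← hB1, getD_append_last]
        refine ⟨hc0, by omega⟩
      · rw [List.getD_append _ _ _ _ (by omega)]
        exact ⟨(hI7 j (by omega)).1, (hI7 j (by omega)).2⟩
  · rw [if_neg hcond, if_neg hcond]
    refine ⟨hA1, hA2, by simp [hB1], hI4, ?_, fun j hj1 hj2 => hI6 j (by omega) hj2, ?_⟩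
    · intro j hj
      by_cases hje : j = k + 1
      · subst hje
        have hR : (stB.1 ++ [(k : Int) + 1]).getD (k + 1) 0 = (k : Int) + 1 := by
          rw [← hB1, getD_append_last]
        rw [hR, hI6 (k + 1) (by omega) hkn]
        push_cast
        ring
      · rw [List.getD_append _ _ _ _ (by omega), hI5 j (by omega)]
    · intro j hj
      by_cases hje : j = k + 1
      · subst hje
        rw [← hB1, getD_append_last]
        constructor <;> omega
      · rw [List.getD_append _ _ _ _ (by omega)]
        exact hI7 j (by omega)

lemma getD_idRange (n j : Nat) (hj : j ≤ n) :
    (PySem.List.pyRange 0 ((n : Int) + 1)).getD j 0 = (j : Int) := by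
  rw [PySem.List.pyRange_one, PySem.List.getD_map_range _ _ _ _ (by omega)]
  simp

lemma length_idRange (n : Nat) : (PySem.List.pyRange 0 ((n : Int) + 1)).length = n + 1 := by
  rw [PySem.List.length_pyRange_one]
  omega

lemma cover_base (n : Nat) (hn : 1 ≤ n) :
    CoverInv n 1 (PySem.List.pyRange 0 ((n : Int) + 1), PySem.List.pyRange 0 ((n : Int) + 1))
      ([0, 1], PySem.Dict.empty) := by
  refine ⟨length_idRange n, length_idRange n, rfl, ?_, ?_, ?_, ?_⟩
  · intro j hj
    rw [getD_idRange n j hj]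
    rfl
  · intro j hj
    rw [getD_idRange n j (by omega)]
    interval_cases j <;> rfl
  · intro j hj1 hj2
    exact getD_idRange n j hj2
  · intro j hj
    interval_cases j <;> constructor <;> norm_num

lemma cover_fold (n : Nat) (psT : List Int)
    (hb : ∀ i : Nat, 1 ≤ i → i ≤ n → 0 ≤ psT.getD i 0 ∧ psT.getD i 0 ≤ (i : Int) - 1)
    (hn : 1 ≤ n) (k : Nat) (hk1 : 1 ≤ k) (hkn : k ≤ n) :
    CoverInv n k
      ((PySem.List.pyRange 2 ((k : Int) + 1)).foldl (coverStepA psT)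
        (PySem.List.pyRange 0 ((n : Int) + 1), PySem.List.pyRange 0 ((n : Int) + 1)))
      ((PySem.List.pyRange 2 ((k : Int) + 1)).foldl (altCoverStep psT)
        ([0, 1], PySem.Dict.empty)) := by
  induction k, hk1 using Nat.le_induction with
  | base =>
    rw [show PySem.List.pyRange 2 (((1 : Nat) : Int) + 1) = [] from
      PySem.List.pyRange_one_eq_nil (by norm_num)]
    exact cover_base n hn
  | succ k hk ih =>
    rw [show PySem.List.pyRange 2 (((k + 1 : Nat) : Int) + 1) =
        PySem.List.pyRange 2 ((k : Int) + 1) ++ [(k : Int) + 1] from by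
      rw [show ((k + 1 : Nat) : Int) + 1 = ((k : Int) + 1) + 1 by push_cast; ring]
      exact PySem.List.pyRange_one_succ_right (by omega), List.foldl_append, List.foldl_append]
    simp only [List.foldl_cons, List.foldl_nil]
    exact cover_step n psT hb k hkn _ _ (ih (by omega))

-- ===== VERDICT (by name: the statement is the Claim_ definition above) =====
theorem shortest_cover_spec : Claim_equal_shortest_cover := by
  intro word _ hpre
  simp only [Spec_shortest_cover, shortest_cover, shortest_cover_alt]
  have hs : word.toList ≠ [] := by
    intro h
    exact hpre (String.toList_eq_nil_iff.mp h)
  rw [if_neg hs]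
  set s := word.toList with hsd
  set n := s.length with hnd
  have hn1 : 1 ≤ n := by
    have := List.length_pos_iff.mpr hs
    omega
  have hps : (PySem.List.pyRange 1 (n : Int)).foldl (altPsStep s) [0, 0] =
      0 :: prefix_suffix_table s (n - 1) := by
    have hc : (((n : Nat) - 1 : Nat) : Int) + 1 = (n : Int) := by omega
    rw [← hc]
    exact psB_eq s (n - 1)
  rw [hps]
  set psT := 0 :: prefix_suffix_table s (n - 1) with hpsTd
  have hlen : psT.length = n + 1 := by
    simp [hpsTd, pst_length]
    omega
  have hbnd : ∀ i : Nat, 1 ≤ i → i ≤ n → 0 ≤ psT.getD i 0 ∧ psT.getD i 0 ≤ (i : Int) - 1 := by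
    intro i h1 h2
    match i, h1 with
    | i0 + 1, _ =>
      have hcons : psT.getD (i0 + 1) 0 = (prefix_suffix_table s (n - 1)).getD i0 0 := by
        simp [hpsTd]
      obtain ⟨hb1, hb2⟩ := pst_bounds s (n - 1) i0 (by omega)
      rw [hcons]
      constructor
      · exact hb1
      · push_cast
        omega
  have inv := cover_fold n psT hbnd hn1 n hn1 (le_refl n)
  obtain ⟨_, hA2, hB1, _, hI5, _, _⟩ := inv
  have hlast : PySem.List.pyGetD psT (-1) 0 = psT.getD n 0 := by
    rw [PySem.List.pyGetD_neg_one _ _ (by simp [hpsTd]), List.getLast_eq_getElem,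
      List.getD_eq_getElem _ _ (by omega)]
    congr 1
    omega
  have hlastB : PySem.List.pyGetD psT (n : Int) 0 = psT.getD n 0 :=
    PySem.List.pyGetD_natCast _ _ _
  rw [hlast, hlastB]
  obtain ⟨hq0, hq1⟩ := hbnd n hn1 (le_refl n)
  set q := psT.getD n 0 with hqd
  have hqcast : ((q.toNat : Nat) : Int) = q := Int.toNat_of_nonneg hq0
  have hfin : PySem.List.pyGetD
      ((PySem.List.pyRange 2 ((n : Int) + 1)).foldl (coverStepA psT)
        (PySem.List.pyRange 0 ((n : Int) + 1), PySem.List.pyRange 0 ((n : Int) + 1))).2 q 0 =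
      PySem.List.pyGetD
        ((PySem.List.pyRange 2 ((n : Int) + 1)).foldl (altCoverStep psT)
          ([0, 1], PySem.Dict.empty)).1 q 0 := by
    rw [← hqcast, PySem.List.pyGetD_natCast, PySem.List.pyGetD_natCast]
    exact hI5 q.toNat (by omega)
  rw [hfin]
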